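-- pv_equiv track=rewrite | github.com/randomtuser/python_1_year_HW | specops.py | cilj
-- ===== SOURCE A (Python) =====
-- def cilj(x, y, pot):
--     k1 = x
--     k2 = y
--     for znak in pot:
--         if znak == "v":
--             k2 += 1
--         if znak == ">":
--             k1 += 1
--         if znak == "<":
--             k1 -= 1
--         if znak == "^":
--             k2 -= 1
--     return (k1, k2)
-- ===== SOURCE B (Python) =====
-- _DELTA = {">": (1, 0), "<": (-1, 0), "v": (0, 1), "^": (0, -1)}
--
-- def _delta(s):
--     # divide-and-conquer: displacement of a move string = sum of the halves' displacements
--     if len(s) == 0: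
--         return (0, 0)
--     if len(s) == 1:
--         return _DELTA.get(s, (0, 0))
--     m = len(s) // 2
--     ax, ay = _delta(s[:m])
--     bx, by = _delta(s[m:])
--     return (ax + bx, ay + by)
--
-- def cilj(x, y, pot):
--     dx, dy = _delta(pot)
--     return (x + dx, y + dy)
-- ===== Notes on version B (the rewrite author's own statement) =====
-- stated objective: alternative
-- what changed: Replaced A's single accumulating left-to-right loop by a divide-and-conquer recursion that splits the move string in half, computes each half's displacement vector recursively (single characters via a lookup table), and adds the vectors; correct because displacement is additive under concatenation.
import Mathlib
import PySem

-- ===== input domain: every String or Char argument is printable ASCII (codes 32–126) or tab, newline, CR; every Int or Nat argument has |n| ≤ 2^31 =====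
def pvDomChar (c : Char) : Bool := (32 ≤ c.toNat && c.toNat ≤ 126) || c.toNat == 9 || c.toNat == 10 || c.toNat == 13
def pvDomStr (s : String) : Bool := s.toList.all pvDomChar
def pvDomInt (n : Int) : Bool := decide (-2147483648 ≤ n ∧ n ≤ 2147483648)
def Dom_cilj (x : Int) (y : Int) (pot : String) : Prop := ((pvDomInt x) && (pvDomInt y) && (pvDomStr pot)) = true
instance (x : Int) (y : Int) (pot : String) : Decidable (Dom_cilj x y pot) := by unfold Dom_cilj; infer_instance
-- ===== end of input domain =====

-- B replaces A's accumulating per-character loop by a divide-and-conquer recursion over halves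
-- of the move string, summing displacement vectors (alternative decomposition, same cost).

-- ===== PORT A =====
-- literal port of A's loop: fold over the characters, updating (k1, k2) with the four ifs in order
def cilj (x : Int) (y : Int) (pot : String) : Int × Int :=
  pot.toList.foldl
    (fun (k : Int × Int) znak =>
      let k2 := if znak = 'v' then k.2 + 1 else k.2
      let k1 := if znak = '>' then k.1 + 1 else k.1
      let k1 := if znak = '<' then k1 - 1 else k1
      let k2 := if znak = '^' then k2 - 1 else k2
      (k1, k2))
    (x, y)

-- ===== PORT B =====
-- port of Source B's _DELTA lookup for a single character
def ciljCharDelta (c : Char) : Int × Int :=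
  if c = '>' then (1, 0)
  else if c = '<' then (-1, 0)
  else if c = 'v' then (0, 1)
  else if c = '^' then (0, -1)
  else (0, 0)

-- port of Source B's _delta: split in half, recurse on each half, add the displacement vectors
def ciljDelta : List Char → Int × Int
  | [] => (0, 0)
  | [c] => ciljCharDelta c
  | a :: b :: t =>
    let m := (a :: b :: t).length / 2
    let da := ciljDelta ((a :: b :: t).take m)
    let db := ciljDelta ((a :: b :: t).drop m)
    (da.1 + db.1, da.2 + db.2)
termination_by l => l.length
decreasing_by
  · simp [List.length_take]; omega
  · simp [List.length_drop]; omega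

def cilj_alt (x : Int) (y : Int) (pot : String) : Int × Int :=
  let d := ciljDelta pot.toList
  (x + d.1, y + d.2)

-- ===== PRECONDITION & SPEC =====
def Spec_cilj (x : Int) (y : Int) (pot : String) (out : Int × Int) : Prop := out = cilj_alt x y pot
instance (x : Int) (y : Int) (pot : String) (out : Int × Int) : Decidable (Spec_cilj x y pot out) := by unfold Spec_cilj; infer_instance

-- ===== CLAIM (what is proved, stated in full; the proofs are below) =====
def Claim_equal_cilj : Prop := ∀ (x : Int) (y : Int) (pot : String), Dom_cilj x y pot → Spec_cilj x y pot (cilj x y pot)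

-- ===== LEMMAS AND PROOFS =====
-- characterisation of A's loop: its result is the start point plus net character counts
theorem cilj_foldl_counts (l : List Char) (x y : Int) :
    l.foldl
      (fun (k : Int × Int) znak =>
        let k2 := if znak = 'v' then k.2 + 1 else k.2
        let k1 := if znak = '>' then k.1 + 1 else k.1
        let k1 := if znak = '<' then k1 - 1 else k1
        let k2 := if znak = '^' then k2 - 1 else k2
        (k1, k2)) (x, y)
    = (x + (l.count '>' : Int) - (l.count '<' : Int),
       y + (l.count 'v' : Int) - (l.count '^' : Int)) := by
  induction l generalizing x y with
  | nil => simp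
  | cons c t ih =>
    simp only [List.foldl_cons, List.count_cons, ih]
    by_cases h1 : c = 'v' <;> by_cases h2 : c = '>' <;> by_cases h3 : c = '<' <;>
      by_cases h4 : c = '^' <;> simp_all <;> ring

-- characterisation of B's divide-and-conquer: same net character counts (counts add over halves)
theorem ciljDelta_counts (l : List Char) :
    ciljDelta l
    = ((l.count '>' : Int) - (l.count '<' : Int),
       (l.count 'v' : Int) - (l.count '^' : Int)) := by
  induction l using ciljDelta.induct with
  | case1 => simp [ciljDelta]
  | case2 c =>
    simp only [ciljDelta, ciljCharDelta]
    by_cases h1 : c = '>' <;> by_cases h2 : c = '<' <;> by_cases h3 : c = 'v' <;>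
      by_cases h4 : c = '^' <;> simp_all
  | case3 a b t m iha ihb =>
    simp only [ciljDelta] at *
    rw [iha, ihb]
    have hsplit := List.take_append_drop ((a :: b :: t).length / 2) (a :: b :: t)
    conv_rhs => rw [← hsplit]
    simp only [List.count_append, Prod.mk.injEq, m]
    push_cast
    constructor <;> ring

-- ===== VERDICT (by name: the statement is the Claim_ definition above) =====
theorem cilj_spec : Claim_equal_cilj := by
  intro x y pot _
  unfold Spec_cilj cilj cilj_alt
  rw [ciljDelta_counts, cilj_foldl_counts]
  simp
  constructor <;> ring
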